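-- pv_equiv track=rewrite | github.com/MrBrantCode/unitest_baseline | mut_generate/mist_train_taco/taco_7982/solution.py | longest_equal_freq_prefix
-- ===== SOURCE A (Python) =====
-- from collections import Counter
--
-- def longest_equal_freq_prefix(nums):
--     def isvalid(C):
--         if len(C) > 2:
--             return False
--         if len(C) == 1:
--             a = min(C)
--             if a == 1 or C[a] == 1:
--                 return True
--             return False
--         (a, b) = sorted(C)
--         if a == C[a] == 1:
--             return True
--         return True if C[b] == 1 and b - 1 == a else False
--
--     def remove(B, x):
--         if B[x] == 1:
--             B.pop(x)
--         else:
--             B[x] -= 1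
--
--     B = Counter(nums)
--     C = Counter(B.values())
--     for i in reversed(range(len(nums))):
--         if isvalid(C):
--             return i + 1
--         x = nums[i]
--         remove(C, B[x])
--         remove(B, x)
--         if B[x]:
--             C[B[x]] += 1
--     return 0
-- ===== SOURCE B (Python) =====
-- from collections import Counter
--
-- def longest_equal_freq_prefix(nums):
--     count = Counter()
--     freq = Counter()
--     maxF = 0
--     res = 0
--     for i, x in enumerate(nums):
--         c = count[x] + 1
--         count[x] = c
--         if c > 1:
--             freq[c - 1] -= 1
--         freq[c] += 1
--         if c > maxF:
--             maxF = c
--         n = i + 1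
--         if (maxF == 1
--                 or (freq[maxF] == 1 and maxF == n)
--                 or (freq[1] == 1 and maxF * freq[maxF] == n - 1)
--                 or (freq[maxF] == 1 and (maxF - 1) * (freq[maxF - 1] + 1) == n - 1)):
--             res = n
--     return res
-- ===== Notes on version B (the rewrite author's own statement) =====
-- stated objective: idiomatic
-- what changed: A builds Counters of the whole list and scans prefixes longest-first by deleting elements off the end, judging each prefix by a structural case analysis of the freq-of-freq dict (len/min/sorted); B is the canonical single forward pass that grows count and freq-of-freq dicts with a running maximum frequency and judges each prefix by arithmetic conditions, keeping the best valid length.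
import Mathlib
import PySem

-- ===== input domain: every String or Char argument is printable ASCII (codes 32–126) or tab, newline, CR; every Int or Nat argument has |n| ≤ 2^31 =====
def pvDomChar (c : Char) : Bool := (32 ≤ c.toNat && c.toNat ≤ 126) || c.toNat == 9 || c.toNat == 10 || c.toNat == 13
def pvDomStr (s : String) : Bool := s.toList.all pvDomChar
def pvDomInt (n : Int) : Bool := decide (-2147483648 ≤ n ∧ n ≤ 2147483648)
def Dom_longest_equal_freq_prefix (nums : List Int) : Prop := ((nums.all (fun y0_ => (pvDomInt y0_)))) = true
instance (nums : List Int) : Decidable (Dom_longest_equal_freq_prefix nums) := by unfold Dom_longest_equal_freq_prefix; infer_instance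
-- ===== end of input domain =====

-- B replaces A's backward scan (build Counters of the whole list, then peel elements off the end,
-- checking each prefix with a dict-shape analysis) by the canonical single forward pass that grows
-- count/freq-of-freq dicts with a running max frequency and checks each prefix arithmetically
-- (objective: idiomatic/alternative; both are one-pass dict algorithms of the same asymptotic cost).

-- ===== PORT A =====
-- isvalid(C): Python's tuple unpacking `(a, b) = sorted(C)` raises only when len(C) == 0, which no
-- call site reaches (C there describes a nonempty prefix); that branch is mapped to `false`.

def pyIsvalid (C : PySem.Dict Int Int) : Bool :=
  if 2 < C.size then false
  else if C.size == 1 then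
    let a := (PySem.List.min? C.keys (fun k => k)).getD 0
    if a == 1 || C.getD a 0 == 1 then true else false
  else
    match PySem.List.sorted C.keys (fun k => k) false with
    | [a, b] =>
      if a == C.getD a 0 && C.getD a 0 == 1 then true
      else if C.getD b 0 == 1 && b - 1 == a then true else false
    | _ => false

def pyRemove (B : PySem.Dict Int Int) (x : Int) : PySem.Dict Int Int :=
  if B.getD x 0 == 1 then B.erase x else B.insert x (B.getD x 0 - 1)

def pyLoopA (nums : List Int) : Nat → PySem.Dict Int Int → PySem.Dict Int Int → Int
  | 0, _, _ => 0
  | i+1, B, C =>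
    if pyIsvalid C then (i : Int) + 1
    else
      let x := PySem.List.pyGetD nums (i : Int) 0
      let C1 := pyRemove C (B.getD x 0)
      let B1 := pyRemove B x
      if B1.getD x 0 ≠ 0 then
        pyLoopA nums i B1 (C1.insert (B1.getD x 0) (C1.getD (B1.getD x 0) 0 + 1))
      else pyLoopA nums i B1 C1

def longest_equal_freq_prefix (nums : List Int) : Int :=
  let B := PySem.Dict.counter nums
  let C := PySem.Dict.counter B.values
  pyLoopA nums nums.length B C

-- ===== PORT B =====

def altStep (st : PySem.Dict Int Int × PySem.Dict Int Int × Int × Int) (ix : Int × Int) :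
    PySem.Dict Int Int × PySem.Dict Int Int × Int × Int :=
  let count := st.1
  let freq := st.2.1
  let maxF := st.2.2.1
  let res := st.2.2.2
  let c := count.getD ix.2 0 + 1
  let count := count.insert ix.2 c
  let freq := if 1 < c then freq.insert (c - 1) (freq.getD (c - 1) 0 - 1) else freq
  let freq := freq.insert c (freq.getD c 0 + 1)
  let maxF := if maxF < c then c else maxF
  let n := ix.1 + 1
  let res :=
    if maxF == 1
       || (freq.getD maxF 0 == 1 && maxF == n)
       || (freq.getD 1 0 == 1 && maxF * freq.getD maxF 0 == n - 1)
       || (freq.getD maxF 0 == 1 && (maxF - 1) * (freq.getD (maxF - 1) 0 + 1) == n - 1)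
    then n else res
  (count, freq, maxF, res)

def longest_equal_freq_prefix_alt (nums : List Int) : Int :=
  ((PySem.List.enumerate nums).foldl altStep (PySem.Dict.empty, PySem.Dict.empty, 0, 0)).2.2.2

-- ===== PRECONDITION & SPEC =====
def Spec_longest_equal_freq_prefix (nums : List Int) (out : Int) : Prop := out = longest_equal_freq_prefix_alt nums
instance (nums : List Int) (out : Int) : Decidable (Spec_longest_equal_freq_prefix nums out) := by unfold Spec_longest_equal_freq_prefix; infer_instance

-- ===== CLAIM (what is proved, stated in full; the proofs are below) =====
def Claim_equal_longest_equal_freq_prefix : Prop := ∀ (nums : List Int), Dom_longest_equal_freq_prefix nums → Spec_longest_equal_freq_prefix nums (longest_equal_freq_prefix nums)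

-- ===== LEMMAS AND PROOFS =====
-- reference data of a prefix p: cC p f = how many distinct values occur exactly f times in p,
-- mF p = the largest multiplicity, good p = "p becomes all-equal-frequency after deleting one
-- element" in B's arithmetic form, aSpec q i = the answer over the first i prefixes of q.

theorem get?_erase_self (d : PySem.Dict Int Int) (k : Int) : (d.erase k).get? k = none := by
  simp only [PySem.Dict.erase, PySem.Dict.get?]
  rw [List.find?_eq_none.2]
  · rfl
  · intro p hp
    simp only [List.mem_filter] at hp
    simpa using hp.2

theorem get?_erase_of_ne (d : PySem.Dict Int Int) (k k' : Int) (h : k' ≠ k) :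
    (d.erase k).get? k' = d.get? k' := by
  simp only [PySem.Dict.erase, PySem.Dict.get?]
  congr 1
  induction d.items with
  | nil => rfl
  | cons p t ih =>
    by_cases hpk : p.1 = k
    · have h1 : (!p.1 == k) = false := by simp [hpk]
      have h2 : (p.1 == k') = false := by simp [hpk, h.symm]
      simp [List.filter_cons, h1, List.find?_cons, h2, ih]
    · have h1 : (!p.1 == k) = true := by simp [hpk]
      simp only [List.filter_cons, h1, if_true, List.find?_cons]
      cases hk' : (p.1 == k') <;> simp [hk', ih]

theorem getD_erase (d : PySem.Dict Int Int) (k k' : Int) :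
    (d.erase k).getD k' 0 = if k' = k then 0 else d.getD k' 0 := by
  by_cases h : k' = k
  · subst h
    simp [PySem.Dict.getD_eq_get?_getD, get?_erase_self]
  · simp [PySem.Dict.getD_eq_get?_getD, get?_erase_of_ne d k k' h, h]

theorem mem_keys_erase (d : PySem.Dict Int Int) (k k' : Int) :
    k' ∈ (d.erase k).keys ↔ k' ∈ d.keys ∧ k' ≠ k := by
  simp only [PySem.Dict.keys, PySem.Dict.erase, List.mem_map, List.mem_filter]
  constructor
  · rintro ⟨p, ⟨hp, hne⟩, rfl⟩
    simp only [Bool.not_eq_eq_eq_not, Bool.not_true, beq_eq_false_iff_ne] at hne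
    exact ⟨⟨p, hp, rfl⟩, hne⟩
  · rintro ⟨⟨p, hp, rfl⟩, hne⟩
    exact ⟨p, ⟨hp, by simpa using hne⟩, rfl⟩

theorem nodup_keys_erase (d : PySem.Dict Int Int) (k : Int) (h : d.keys.Nodup) :
    (d.erase k).keys.Nodup := by
  simp only [PySem.Dict.keys, PySem.Dict.erase] at *
  
  have hs : ((d.items.filter (fun p => !p.1 == k)).map (fun p => p.1)).Sublist (d.items.map (fun p => p.1)) :=
    List.Sublist.map _ (List.filter_sublist (l := d.items))
  exact hs.nodup h

theorem setOfList_append (p : List Int) (x : Int) :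
    PySem.Set.ofList (p ++ [x]) = PySem.Set.add (PySem.Set.ofList p) x := by
  rw [PySem.Set.ofList_eq_foldl, PySem.Set.ofList_eq_foldl, List.foldl_append]
  rfl

theorem countP_upd (l : List Int) (hnd : l.Nodup) (x : Int) (hx : x ∈ l) (q q' : Int → Bool)
    (hagree : ∀ y ∈ l, y ≠ x → q y = q' y) :
    (l.countP q' : Int) = (l.countP q : Int) + (if q' x then 1 else 0) - (if q x then 1 else 0) := by
  induction l with
  | nil => cases hx
  | cons a t ih =>
    simp only [List.nodup_cons] at hnd
    rcases List.mem_cons.1 hx with rfl | hxt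
    · have htail : t.countP q' = t.countP q :=
        List.countP_congr (fun y hy => by
          rw [hagree y (List.mem_cons_of_mem _ hy) (fun h => hnd.1 (h ▸ hy))])
      simp only [List.countP_cons, htail]
      by_cases h1 : q x <;> by_cases h2 : q' x <;> simp [h1, h2] <;> push_cast <;> ring
    · have hax : a ≠ x := fun h => hnd.1 (h ▸ hxt)
      have hrec := ih hnd.2 hxt (fun y hy hyx => hagree y (List.mem_cons_of_mem _ hy) hyx)
      simp only [List.countP_cons]
      rw [hagree a (List.mem_cons_self) hax]
      by_cases h2 : q' a <;> simp only [h2, if_true, if_false] <;> push_cast <;> push_cast at hrec <;> omega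

def cC (p : List Int) (f : Int) : Int :=
  ((PySem.Set.ofList p).countP (fun y => (p.count y : Int) == f) : Int)

def mF (p : List Int) : Int := p.foldl (fun m y => max m ((p.count y : Int))) 0

def good (p : List Int) : Bool :=
  let n : Int := p.length
  let M := mF p
  M == 1 || (cC p M == 1 && M == n) || (cC p 1 == 1 && M * cC p M == n - 1)
    || (cC p M == 1 && (M - 1) * (cC p (M - 1) + 1) == n - 1)

def aSpec (q : List Int) : Nat → Int
  | 0 => 0
  | i+1 => if good (q.take (i+1)) then (i : Int) + 1 else aSpec q i

theorem count_append_singleton (p : List Int) (x y : Int) :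
    (p ++ [x]).count y = p.count y + (if y = x then 1 else 0) := by
  rcases eq_or_ne y x with rfl | h
  · simp
  · simp [List.count_append, List.count_singleton, h, h.symm]

theorem cC_append (p : List Int) (x f : Int) :
    cC (p ++ [x]) f = cC p f + (if f = (p.count x : Int) + 1 then 1 else 0)
      - (if f = (p.count x : Int) ∧ x ∈ p then 1 else 0) := by
  classical
  unfold cC
  rw [setOfList_append]
  by_cases hx : x ∈ p
  · have hmem : x ∈ PySem.Set.ofList p := (PySem.Set.mem_ofList p x).2 hx
    have hadd : PySem.Set.add (PySem.Set.ofList p) x = PySem.Set.ofList p := by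
      simp [PySem.Set.add, PySem.Set.contains, hmem]
    rw [hadd]
    have := countP_upd (PySem.Set.ofList p) (PySem.Set.nodup_ofList p) x hmem
      (fun y => (p.count y : Int) == f) (fun y => ((p ++ [x]).count y : Int) == f)
      (fun y _ hyx => by
        show ((p.count y : Int) == f) = (((p ++ [x]).count y : Int) == f)
        rw [count_append_singleton]; simp [hyx])
    rw [this]
    have hcx : ((p ++ [x]).count x : Int) = (p.count x : Int) + 1 := by
      rw [count_append_singleton]; simp
    simp only [hcx, hx, and_true, beq_iff_eq]
    by_cases h1 : f = (p.count x : Int) + 1 <;> by_cases h2 : f = (p.count x : Int) <;>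
      simp [h1, h2, eq_comm] <;> try omega
  · have hmem : x ∉ PySem.Set.ofList p := fun h => hx ((PySem.Set.mem_ofList p x).1 h)
    have hcon : ¬ ((PySem.Set.ofList p).contains x = true) := by
      intro h
      exact hmem (by simpa [PySem.Set.contains] using h)
    have hadd : PySem.Set.add (PySem.Set.ofList p) x = PySem.Set.ofList p ++ [x] := by
      rw [PySem.Set.add, if_neg hcon]
    rw [hadd, List.countP_append]
    have hcong : (PySem.Set.ofList p).countP (fun y => ((p ++ [x]).count y : Int) == f)
        = (PySem.Set.ofList p).countP (fun y => (p.count y : Int) == f) := by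
      apply List.countP_congr
      intro y hy
      have hyx : y ≠ x := fun h => hmem (h ▸ hy)
      rw [count_append_singleton]
      simp [hyx]
    rw [hcong]
    
    have hc0 : p.count x = 0 := List.count_eq_zero.2 hx
    have hcx : ((p ++ [x]).count x : Int) = 1 := by simp [count_append_singleton, hc0]
    simp only [List.countP_cons, List.countP_nil, hcx, hx, and_false, beq_iff_eq]
    by_cases h1 : f = 1 <;> simp [h1, hc0, eq_comm] <;> push_cast <;> omega

theorem cC_nonneg (p : List Int) (f : Int) : 0 ≤ cC p f := Int.natCast_nonneg _

theorem cC_ne_zero_iff (p : List Int) (f : Int) :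
    cC p f ≠ 0 ↔ ∃ y ∈ p, (p.count y : Int) = f := by
  unfold cC
  rw [Ne, Int.natCast_eq_zero, ← Ne, ← Nat.pos_iff_ne_zero, List.countP_pos_iff]
  constructor
  · rintro ⟨y, hy, hq⟩
    exact ⟨y, (PySem.Set.mem_ofList p y).1 hy, by simpa using hq⟩
  · rintro ⟨y, hy, hq⟩
    exact ⟨y, (PySem.Set.mem_ofList p y).2 hy, by simpa using hq⟩

theorem one_le_of_cC_ne_zero (p : List Int) (f : Int) (h : cC p f ≠ 0) : 1 ≤ f := by
  rcases (cC_ne_zero_iff p f).1 h with ⟨y, hy, hq⟩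
  have : 0 < p.count y := List.count_pos_iff.2 hy
  omega

theorem count_le_mF (p : List Int) (y : Int) (hy : y ∈ p) : (p.count y : Int) ≤ mF p :=
  (PySem.List.le_foldl_max_int p (fun y => (p.count y : Int)) 0).2 y hy

theorem mF_exists (p : List Int) (hp : p ≠ []) : ∃ y ∈ p, (p.count y : Int) = mF p := by
  have hmap : mF p = (p.map (fun y => (p.count y : Int))).foldl max 0 := by
    rw [List.foldl_map]; rfl
  rcases PySem.List.foldl_max_mem (p.map (fun y => (p.count y : Int))) 0 with h0 | hmem
  · exfalso
    rcases List.exists_mem_of_ne_nil p hp with ⟨y, hy⟩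
    have h1 : 0 < p.count y := List.count_pos_iff.2 hy
    have h2 := count_le_mF p y hy
    rw [hmap] at h2
    omega
  · rw [← hmap] at hmem
    rcases List.mem_map.1 hmem with ⟨y, hy, hq⟩
    exact ⟨y, hy, hq⟩

theorem mF_unique (p : List Int) (m : Int) (h1 : ∀ y ∈ p, (p.count y : Int) ≤ m)
    (h2 : ∃ y ∈ p, (p.count y : Int) = m) : m = mF p := by
  rcases h2 with ⟨y, hy, hq⟩
  have hp : p ≠ [] := List.ne_nil_of_mem hy
  rcases mF_exists p hp with ⟨z, hz, hqz⟩
  have := count_le_mF p y hy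
  have := h1 z hz
  omega

theorem mF_nil : mF ([] : List Int) = 0 := rfl

theorem mF_append (p : List Int) (x : Int) :
    mF (p ++ [x]) = max (mF p) ((p.count x : Int) + 1) := by
  have hL : mF p ≤ max (mF p) ((p.count x : Int) + 1) := le_max_left _ _
  have hR : (p.count x : Int) + 1 ≤ max (mF p) ((p.count x : Int) + 1) := le_max_right _ _
  symm
  apply mF_unique
  · intro y hy
    rw [count_append_singleton]
    by_cases hne : y = x
    · subst hne
      simp only [if_pos rfl]
      push_cast
      omega
    · simp only [if_neg hne, add_zero]
      have hyp : y ∈ p := by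
        rcases List.mem_append.1 hy with h | h
        · exact h
        · exact absurd (by simpa using h) hne
      have := count_le_mF p y hyp
      omega
  · by_cases hc : mF p ≤ (p.count x : Int) + 1
    · refine ⟨x, by simp, ?_⟩
      rw [count_append_singleton, if_pos rfl, max_eq_right hc]
      push_cast
      ring
    · rw [not_le] at hc
      have hp : p ≠ [] := by
        intro h; subst h
        simp [mF_nil] at hc
      rcases mF_exists p hp with ⟨y, hy, hq⟩
      have hyx : y ≠ x := by
        intro h; subst h
        omega
      refine ⟨y, List.mem_append_left _ hy, ?_⟩
      rw [count_append_singleton, if_neg hyx, add_zero, hq, max_eq_left hc.le]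

theorem mF_le_of_cC_ne_zero (p : List Int) (f : Int) (h : cC p f ≠ 0) : f ≤ mF p := by
  rcases (cC_ne_zero_iff p f).1 h with ⟨y, hy, hq⟩
  exact hq ▸ count_le_mF p y hy

theorem cC_mF_ne_zero (p : List Int) (hp : p ≠ []) : cC p (mF p) ≠ 0 := by
  rcases mF_exists p hp with ⟨y, hy, hq⟩
  exact (cC_ne_zero_iff p (mF p)).2 ⟨y, hy, hq⟩

theorem cC_eq_card (p : List Int) (f : Int) :
    cC p f = ((p.toFinset.filter (fun y => (p.count y : Int) = f)).card : Int) := by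
  unfold cC
  congr 1
  rw [List.countP_eq_length_filter]
  have hnd : ((PySem.Set.ofList p).filter (fun y => (p.count y : Int) == f)).Nodup :=
    (PySem.Set.nodup_ofList p).filter _
  rw [← List.toFinset_card_of_nodup hnd]
  congr 1
  ext y
  simp [List.mem_toFinset, List.mem_filter, PySem.Set.mem_ofList, Finset.mem_filter]

theorem sum_counts_finset (p : List Int) :
    (∑ y ∈ p.toFinset, (p.count y : Int)) = (p.length : Int) := by
  rw [← Nat.cast_sum]
  exact_mod_cast congrArg (Nat.cast : Nat → Int) (List.sum_toFinset_count_eq_length p)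

theorem sum_group (p : List Int) (ks : List Int) (hnd : ks.Nodup)
    (hm : ∀ f, f ∈ ks ↔ cC p f ≠ 0) :
    (ks.map (fun f => f * cC p f)).sum = (p.length : Int) := by
  classical
  have h1 : (ks.map (fun f => f * cC p f)).sum = ∑ f ∈ ks.toFinset, f * cC p f :=
    (List.sum_toFinset _ hnd).symm
  have h2 : ks.toFinset = p.toFinset.image (fun y => (p.count y : Int)) := by
    ext f
    rw [List.mem_toFinset, hm, cC_ne_zero_iff]
    simp [Finset.mem_image, List.mem_toFinset]
  have h3 : ∀ f, f * cC p f
      = ∑ y ∈ p.toFinset.filter (fun y => (p.count y : Int) = f), (p.count y : Int) := by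
    intro f
    rw [Finset.sum_congr rfl (fun y hy => (Finset.mem_filter.1 hy).2)]
    rw [Finset.sum_const, cC_eq_card]
    simp [mul_comm]
  calc (ks.map (fun f => f * cC p f)).sum
      = ∑ f ∈ p.toFinset.image (fun y => (p.count y : Int)), f * cC p f := by rw [h1, h2]
    _ = ∑ f ∈ p.toFinset.image (fun y => (p.count y : Int)),
          ∑ y ∈ p.toFinset.filter (fun y => (p.count y : Int) = f), (p.count y : Int) := by
          exact Finset.sum_congr rfl (fun f _ => h3 f)
    _ = ∑ y ∈ p.toFinset, (p.count y : Int) :=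
          Finset.sum_fiberwise_of_maps_to (fun y hy => Finset.mem_image_of_mem _ hy) _
    _ = (p.length : Int) := sum_counts_finset p

theorem sorted_pair (a b : Int) :
    PySem.List.sorted [a, b] (fun x => x) false = if b < a then [b, a] else [a, b] := by
  rcases lt_or_ge b a with h | h
  · simp [PySem.List.sorted_eq_foldl_insertBy, PySem.List.insertBy, h]
  · simp [PySem.List.sorted_eq_foldl_insertBy, PySem.List.insertBy, not_lt.2 h]

theorem size_eq_keys_length (C : PySem.Dict Int Int) : C.size = C.keys.length := by
  simp [PySem.Dict.size, PySem.Dict.keys]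

theorem sum_split (ks : List Int) (hnd : ks.Nodup) (t : Int → Int) (h1 : ∀ f ∈ ks, 1 ≤ t f)
    (S : Finset Int) (hS : S ⊆ ks.toFinset) :
    (∑ f ∈ S, t f) + ((ks.length : Int) - S.card) ≤ (ks.map t).sum := by
  classical
  rw [← List.sum_toFinset _ hnd]
  rw [← Finset.sum_sdiff hS]
  have hcard : (ks.toFinset \ S).card = ks.length - S.card := by
    rw [Finset.card_sdiff, Finset.inter_eq_left.2 hS, List.toFinset_card_of_nodup hnd]
  have hges : (((ks.toFinset \ S).card : Int)) ≤ ∑ f ∈ ks.toFinset \ S, t f := by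
    calc ((ks.toFinset \ S).card : Int) = ∑ _f ∈ ks.toFinset \ S, (1 : Int) := by simp
    _ ≤ ∑ f ∈ ks.toFinset \ S, t f := by
        apply Finset.sum_le_sum
        intro f hf
        exact h1 f (List.mem_toFinset.1 (Finset.mem_sdiff.1 hf).1)
  have hSc : S.card ≤ ks.length := by
    calc S.card ≤ ks.toFinset.card := Finset.card_le_card hS
    _ = ks.length := List.toFinset_card_of_nodup hnd
  rw [hcard] at hges
  push_cast at hges ⊢
  omega

-- two-key arithmetic core

theorem bridge2 (p : List Int) (u v : Int) (hlt : u < v)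
    (hu1 : 1 ≤ u) (hU : 1 ≤ cC p u) (hV : 1 ≤ cC p v) (hMv : mF p = v)
    (hn : u * cC p u + v * cC p v = (p.length : Int))
    (hz : ∀ f, f ≠ u → f ≠ v → cC p f = 0) :
    ((u = cC p u ∧ cC p u = 1) ∨ (cC p v = 1 ∧ v - 1 = u)) ↔ good p = true := by
  have hP1 : cC p u = 1 → u * cC p u = u := fun h => by rw [h, mul_one]
  have hP1' : u = 1 → u * cC p u = cC p u := fun h => by rw [h, one_mul]
  have hQ1 : cC p v = 1 → v * cC p v = v := fun h => by rw [h, mul_one]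
  have hPu : u ≤ u * cC p u := le_mul_of_one_le_right (by omega) hU
  have hQv : v ≤ v * cC p v := le_mul_of_one_le_right (by omega) hV
  have hc1a : u = 1 → cC p 1 = cC p u := fun h => by rw [h]
  have hc1b : u ≠ 1 → cC p 1 = 0 := fun h => hz 1 (fun hh => h hh.symm) (by omega)
  have hRa : u = v - 1 → (v - 1) * (cC p (v - 1) + 1) = u * cC p u + u := fun h => by
    rw [← h]; ring
  have hRb : u ≠ v - 1 → (v - 1) * (cC p (v - 1) + 1) = v - 1 := fun h => by
    rw [hz (v - 1) (fun hh => h hh.symm) (by omega)]; ring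
  simp only [good, hMv, Bool.or_eq_true, Bool.and_eq_true, beq_iff_eq]
  omega

-- one-key arithmetic core

theorem bridge1 (p : List Int) (a : Int)
    (ha1 : 1 ≤ a) (hA : 1 ≤ cC p a) (hMa : mF p = a)
    (hn : a * cC p a = (p.length : Int))
    (hz : ∀ f, f ≠ a → cC p f = 0) :
    (a = 1 ∨ cC p a = 1) ↔ good p = true := by
  have hP1 : cC p a = 1 → a * cC p a = a := fun h => by rw [h, mul_one]
  have hP1' : a = 1 → a * cC p a = cC p a := fun h => by rw [h, one_mul]
  have hPa : a ≤ a * cC p a := le_mul_of_one_le_right (by omega) hA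
  have hPA : cC p a ≤ a * cC p a := le_mul_of_one_le_left (by omega) ha1
  have hc1 : a ≠ 1 → cC p 1 = 0 := fun h => hz 1 (fun hh => h hh.symm)
  have hcm1 : cC p (a - 1) = 0 := hz _ (by omega)
  simp only [good, hMa, hcm1, Bool.or_eq_true, Bool.and_eq_true, beq_iff_eq, zero_add, mul_one]
  omega

-- three-or-more-keys core: the prefix is never fixable

theorem bridge3 (p : List Int) (ks : List Int) (hks3 : 3 ≤ ks.length) (hnd : ks.Nodup)
    (hone : ∀ f ∈ ks, 1 ≤ f) (hcpos : ∀ f ∈ ks, 1 ≤ cC p f) (hle : ∀ f ∈ ks, f ≤ mF p)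
    (hMmem : mF p ∈ ks) (hsum : (ks.map (fun f => f * cC p f)).sum = (p.length : Int))
    (hkey : ∀ f, f ∈ ks ↔ cC p f ≠ 0) :
    good p = false := by
  classical
  have hterm : ∀ f ∈ ks, 1 ≤ f * cC p f := by
    intro f hf
    have h1 := hone f hf
    have h2 := hcpos f hf
    nlinarith
  -- three distinct keys, all between 1 and mF p
  obtain ⟨a, b, c, t, rfl⟩ : ∃ a b c t, ks = a :: b :: c :: t := by
    match ks, hks3 with
    | a :: b :: c :: t, _ => exact ⟨a, b, c, t, rfl⟩
  have hab : a ≠ b := by simp [List.nodup_cons] at hnd; tauto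
  have hac : a ≠ c := by simp [List.nodup_cons] at hnd; tauto
  have hbc : b ≠ c := by simp [List.nodup_cons] at hnd; tauto
  have ha := hone a (by simp); have hb := hone b (by simp); have hc := hone c (by simp)
  have ha' := hle a (by simp); have hb' := hle b (by simp); have hc' := hle c (by simp)
  have hM3 : 3 ≤ mF p := by omega
  -- F1 : the max-frequency term plus at least (len-1) more
  have hMsub : ({mF p} : Finset Int) ⊆ (a :: b :: c :: t).toFinset := by
    intro f hf
    rw [Finset.mem_singleton] at hf
    subst hf
    exact List.mem_toFinset.2 hMmem
  have F1 := sum_split (a :: b :: c :: t) hnd _ hterm {mF p} hMsub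
  rw [Finset.sum_singleton, Finset.card_singleton, hsum] at F1
  have hlen : (3 : Int) ≤ ((a :: b :: c :: t).length : Int) := by
    push_cast [List.length_cons]
    omega
  have hQ : cC p (mF p) = 1 → mF p * cC p (mF p) = mF p := fun h => by rw [h, mul_one]
  have hR : (mF p - 1) * (cC p (mF p - 1) + 1)
      = (mF p - 1) * cC p (mF p - 1) + mF p - 1 := by ring
  rw [Bool.eq_false_iff]
  intro hgood
  simp only [good, Bool.or_eq_true, Bool.and_eq_true, beq_iff_eq] at hgood
  by_cases hm1 : cC p (mF p - 1) = 0
  · have hS0 : (mF p - 1) * cC p (mF p - 1) = 0 := by rw [hm1, mul_zero]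
    omega
  · have hmem1 : mF p - 1 ∈ (a :: b :: c :: t) := (hkey _).2 hm1
    have hpair : ({mF p, mF p - 1} : Finset Int) ⊆ (a :: b :: c :: t).toFinset := by
      intro f hf
      rw [Finset.mem_insert, Finset.mem_singleton] at hf
      rcases hf with rfl | rfl
      · exact List.mem_toFinset.2 hMmem
      · exact List.mem_toFinset.2 hmem1
    have F3 := sum_split (a :: b :: c :: t) hnd _ hterm {mF p, mF p - 1} hpair
    rw [Finset.sum_pair (by omega : mF p ≠ mF p - 1), hsum,
      Finset.card_pair (by omega : mF p ≠ mF p - 1)] at F3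
    omega

-- the bridge: A's isvalid on the freq-of-freq dict is B's arithmetic condition on the prefix

def InvC (p : List Int) (C : PySem.Dict Int Int) : Prop :=
  C.keys.Nodup ∧ (∀ f, C.getD f 0 = cC p f) ∧ (∀ f, f ∈ C.keys ↔ cC p f ≠ 0)

theorem isvalid_eq_good (p : List Int) (hp : p ≠ []) (C : PySem.Dict Int Int) (h : InvC p C) :
    pyIsvalid C = good p := by
  obtain ⟨hnd, hval, hkey⟩ := h
  have hsz := size_eq_keys_length C
  have hMmem : mF p ∈ C.keys := (hkey _).2 (cC_mF_ne_zero p hp)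
  have hsum := sum_group p C.keys hnd (fun f => hkey f)
  have hone : ∀ f ∈ C.keys, 1 ≤ f := fun f hf => one_le_of_cC_ne_zero p f ((hkey f).1 hf)
  have hcpos : ∀ f ∈ C.keys, 1 ≤ cC p f := fun f hf => by
    have h1 := cC_nonneg p f
    have h2 := (hkey f).1 hf
    omega
  have hle : ∀ f ∈ C.keys, f ≤ mF p := fun f hf => mF_le_of_cC_ne_zero p f ((hkey f).1 hf)
  have hzero : ∀ f, f ∉ C.keys → cC p f = 0 := by
    intro f hf
    have h1 := cC_nonneg p f
    by_contra h2
    exact hf ((hkey f).2 (by omega))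
  rcases hks : C.keys with _ | ⟨a, _ | ⟨b, _ | ⟨c, t⟩⟩⟩
  · rw [hks] at hMmem
    cases hMmem
  · -- one key
    rw [hks] at hMmem hsum hone hcpos
    have hMa : mF p = a := by simpa using hMmem
    have hn : a * cC p a = (p.length : Int) := by simpa using hsum
    have hz : ∀ f, f ≠ a → cC p f = 0 := fun f hf => hzero f (by simp [hks, hf])
    have hsz1 : C.size = 1 := by rw [hsz, hks]; rfl
    have hmin : (PySem.List.min? C.keys (fun k => k)).getD 0 = a := by
      rw [hks, PySem.List.min?_id_cons]
      rfl
    rw [pyIsvalid, hsz1]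
    norm_num
    rw [hmin, hval a]
    rw [Bool.eq_iff_iff]
    simp only [Bool.or_eq_true, decide_eq_true_eq]
    exact bridge1 p a (hone a (by simp)) (hcpos a (by simp)) hMa hn hz
  · -- two keys
    rw [hks] at hMmem hsum hone hcpos hle
    have hab : a ≠ b := by simp [hks, List.nodup_cons] at hnd; tauto
    have hz : ∀ f, f ≠ a → f ≠ b → cC p f = 0 := fun f hf1 hf2 => hzero f (by simp [hks, hf1, hf2])
    have hsz2 : C.size = 2 := by rw [hsz, hks]; rfl
    have hn : a * cC p a + b * cC p b = (p.length : Int) := by simpa using hsum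
    rw [pyIsvalid, hsz2]
    norm_num
    rw [hks, sorted_pair]
    have hMm2 : mF p = a ∨ mF p = b := by simpa using hMmem
    rcases lt_or_gt_of_ne hab with hlt | hgt
    · rw [if_neg (not_lt.2 hlt.le)]
      have hMb : mF p = b := by
        have h1 := hle a (by simp)
        have h2 := hle b (by simp)
        omega
      simp only [hval]
      rw [Bool.eq_iff_iff]
      simp only [Bool.or_eq_true, Bool.and_eq_true, decide_eq_true_eq]
      exact bridge2 p a b hlt (hone a (by simp)) (hcpos a (by simp)) (hcpos b (by simp)) hMb
        (by omega) (fun f h1 h2 => hz f h1 h2)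
    · rw [if_pos hgt]
      have hMa : mF p = a := by
        have h1 := hle a (by simp)
        have h2 := hle b (by simp)
        omega
      simp only [hval]
      rw [Bool.eq_iff_iff]
      simp only [Bool.or_eq_true, Bool.and_eq_true, decide_eq_true_eq]
      exact bridge2 p b a hgt (hone b (by simp)) (hcpos b (by simp)) (hcpos a (by simp)) hMa
        (by omega) (fun f h1 h2 => hz f h2 h1)
  · -- three or more keys
    have hsz3 : 2 < C.size := by
      rw [hsz, hks]
      simp [List.length_cons]
    rw [pyIsvalid, if_pos hsz3]
    rw [hks] at hMmem hsum hone hcpos hle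
    refine (bridge3 p (a :: b :: c :: t) (by simp [List.length_cons]) (hks ▸ hnd)
      hone hcpos hle hMmem hsum (fun f => hks ▸ hkey f)).symm

theorem getD_pyRemove (B : PySem.Dict Int Int) (x y : Int) :
    (pyRemove B x).getD y 0 = if y = x then B.getD x 0 - 1 else B.getD y 0 := by
  unfold pyRemove
  split_ifs with h1 h2 h2
  · rw [beq_iff_eq] at h1
    rw [h2, getD_erase, if_pos rfl]
    omega
  · rw [getD_erase, if_neg h2]
  · rw [h2, PySem.Dict.getD_insert, if_pos rfl]
  · rw [PySem.Dict.getD_insert, if_neg h2]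

theorem mem_keys_pyRemove_ne (B : PySem.Dict Int Int) (x y : Int) (h : y ≠ x) :
    (y ∈ (pyRemove B x).keys ↔ y ∈ B.keys) := by
  unfold pyRemove
  split_ifs with h1
  · rw [mem_keys_erase]
    tauto
  · rw [PySem.Dict.mem_keys_insert]
    tauto

theorem mem_keys_pyRemove_self (B : PySem.Dict Int Int) (x : Int) (hx : x ∈ B.keys) :
    (x ∈ (pyRemove B x).keys ↔ B.getD x 0 ≠ 1) := by
  unfold pyRemove
  split_ifs with h1
  · rw [beq_iff_eq] at h1
    rw [mem_keys_erase]
    simp [h1]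
  · rw [beq_iff_eq] at h1
    rw [PySem.Dict.mem_keys_insert]
    simp [h1]

theorem nodup_keys_pyRemove (B : PySem.Dict Int Int) (x : Int) (h : B.keys.Nodup) :
    (pyRemove B x).keys.Nodup := by
  unfold pyRemove
  split_ifs with h1
  · exact nodup_keys_erase B x h
  · exact PySem.Dict.nodup_keys_insert B x _ h

theorem count_take_mem (p : List Int) (x : Int) : ((p ++ [x]).count x : Int) = (p.count x : Int) + 1 := by
  rw [count_append_singleton]
  simp

-- the A-side step preserves the C-invariant: removing the last element x of p ++ [x]

theorem InvC_step_pos (p : List Int) (x : Int) (C : PySem.Dict Int Int)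
    (h : InvC (p ++ [x]) C) (hxp : x ∈ p) :
    InvC p ((pyRemove C (((p ++ [x]).count x : Int))).insert ((((p ++ [x]).count x : Int)) - 1)
      ((pyRemove C (((p ++ [x]).count x : Int))).getD ((((p ++ [x]).count x : Int)) - 1) 0 + 1)) := by
  obtain ⟨hnd, hval, hkey⟩ := h
  set c : Int := ((p ++ [x]).count x : Int) with hc
  have hcnt : c = (p.count x : Int) + 1 := count_take_mem p x
  have hpx1 : 1 ≤ (p.count x : Int) := by
    have := List.count_pos_iff.2 hxp
    omega
  have hrev : ∀ f, cC p f = cC (p ++ [x]) f - (if f = c then 1 else 0)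
      + (if f = c - 1 then 1 else 0) := by
    intro f
    have h0 := cC_append p x f
    rw [← hcnt] at h0
    have hxpt : (f = (p.count x : Int) ∧ x ∈ p) ↔ f = c - 1 := by
      constructor
      · rintro ⟨h1, _⟩; omega
      · intro h1; exact ⟨by omega, hxp⟩
    by_cases h1 : f = c <;> by_cases h2 : f = c - 1 <;>
      simp only [h1, h2, if_true, if_false, hxpt] at h0 ⊢ <;> simp_all <;> omega
  have hAc : cC (p ++ [x]) c ≠ 0 := by
    rw [cC_ne_zero_iff]
    exact ⟨x, by simp, by rw [hc]⟩
  have hAcnn := cC_nonneg (p ++ [x]) c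
  have hAm1nn := cC_nonneg (p ++ [x]) (c - 1)
  have hcc1 : c - 1 ≠ c := by omega
  have hmemC : c ∈ C.keys := (hkey c).2 hAc
  refine ⟨?_, ?_, ?_⟩
  · exact PySem.Dict.nodup_keys_insert _ _ _ (nodup_keys_pyRemove C c hnd)
  · intro f
    rw [PySem.Dict.getD_insert, hrev f]
    by_cases h1 : f = c - 1
    · subst h1
      rw [if_pos rfl, getD_pyRemove, if_neg hcc1, hval, if_neg hcc1, if_pos rfl]
      omega
    · rw [if_neg h1, getD_pyRemove, if_neg h1]
      by_cases h2 : f = c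
      · subst h2
        rw [if_pos rfl, hval, if_pos rfl]
        omega
      · rw [if_neg h2, hval, if_neg h2]
        omega
  · intro f
    rw [PySem.Dict.mem_keys_insert, hrev f]
    by_cases h1 : f = c - 1
    · subst h1
      rw [if_neg hcc1, if_pos rfl]
      constructor
      · intro _; omega
      · intro _; exact Or.inl rfl
    · rw [if_neg h1]
      by_cases h2 : f = c
      · subst h2
        rw [if_pos rfl]
        constructor
        · rintro (h3 | h3)
          · exact absurd h3.symm hcc1
          · rw [mem_keys_pyRemove_self C c hmemC, hval] at h3
            omega
        · intro h3
          right
          rw [mem_keys_pyRemove_self C c hmemC, hval]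
          omega
      · rw [if_neg h2]
        constructor
        · rintro (h3 | h3)
          · exact absurd h3 h1
          · rw [mem_keys_pyRemove_ne C c f h2] at h3
            have := (hkey f).1 h3
            omega
        · intro h3
          right
          rw [mem_keys_pyRemove_ne C c f h2]
          exact (hkey f).2 (by omega)

theorem InvC_step_zero (p : List Int) (x : Int) (C : PySem.Dict Int Int)
    (h : InvC (p ++ [x]) C) (hxp : x ∉ p) :
    InvC p (pyRemove C (((p ++ [x]).count x : Int))) := by
  obtain ⟨hnd, hval, hkey⟩ := h
  set c : Int := ((p ++ [x]).count x : Int) with hc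
  have hc0 : p.count x = 0 := List.count_eq_zero.2 hxp
  have hcnt : c = 1 := by
    rw [hc, count_take_mem]
    omega
  have hrev : ∀ f, cC p f = cC (p ++ [x]) f - (if f = c then 1 else 0) := by
    intro f
    have h0 := cC_append p x f
    simp only [hxp, and_false, if_false] at h0
    have h2 : (f = (p.count x : Int) + 1) ↔ f = c := by rw [hcnt]; omega
    by_cases h1 : f = c <;>
      simp only [h1, if_true, if_false] at h0 ⊢ <;> simp_all <;> omega
  have hAc : cC (p ++ [x]) c ≠ 0 := by
    rw [cC_ne_zero_iff]
    exact ⟨x, by simp, by rw [hc]⟩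
  have hAcnn := cC_nonneg (p ++ [x]) c
  have hmemC : c ∈ C.keys := (hkey c).2 hAc
  refine ⟨nodup_keys_pyRemove C c hnd, ?_, ?_⟩
  · intro f
    rw [getD_pyRemove, hrev f]
    by_cases h1 : f = c
    · subst h1
      rw [if_pos rfl, hval, if_pos rfl]
    · rw [if_neg h1, hval, if_neg h1]
      omega
  · intro f
    rw [hrev f]
    by_cases h1 : f = c
    · subst h1
      rw [if_pos rfl, mem_keys_pyRemove_self C c hmemC, hval]
      omega
    · rw [if_neg h1, mem_keys_pyRemove_ne C c f h1, hkey]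
      omega

theorem pyLoopA_spec (nums : List Int) (i : Nat) (hi : i ≤ nums.length)
    (B C : PySem.Dict Int Int)
    (hB : ∀ y, B.getD y 0 = ((nums.take i).count y : Int))
    (hC : InvC (nums.take i) C) :
    pyLoopA nums i B C = aSpec nums i := by
  induction i generalizing B C with
  | zero => rfl
  | succ i ih =>
    have hilen : i < nums.length := hi
    have hp1ne : nums.take (i+1) ≠ [] := by
      intro hnil
      have := congrArg List.length hnil
      rw [List.length_take] at this
      simp only [List.length_nil] at this
      omega
    rw [pyLoopA, isvalid_eq_good (nums.take (i+1)) hp1ne C hC, aSpec]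
    by_cases hg : good (nums.take (i+1)) = true
    · simp only [if_pos hg]
    · simp only [if_neg hg]
      have hxi : PySem.List.pyGetD nums (i : Int) 0 = nums.getD i 0 := by
        rw [← PySem.List.pyGetD_natCast]
      rw [hxi]
      set x : Int := nums.getD i 0 with hxdef
      have hgx : x = nums[i] := List.getD_eq_getElem nums 0 hilen
      have htake : nums.take (i+1) = nums.take i ++ [x] := by
        rw [List.take_succ, List.getElem?_eq_getElem hilen, hgx]
        rfl
      have hB1 : ∀ y, (pyRemove B x).getD y 0 = ((nums.take i).count y : Int) := by
        intro y
        rw [getD_pyRemove]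
        by_cases h2 : y = x
        · subst h2
          rw [if_pos rfl, hB x, htake, count_append_singleton, if_pos rfl]
          push_cast
          ring
        · rw [if_neg h2, hB y, htake, count_append_singleton, if_neg h2]
          push_cast
          ring
      have hcond : (pyRemove B x).getD x 0 = (((nums.take i) ++ [x]).count x : Int) - 1 := by
        rw [getD_pyRemove, if_pos rfl, hB x, htake]
      have hBx : B.getD x 0 = (((nums.take i) ++ [x]).count x : Int) := by
        rw [hB x, htake]
      rw [hcond, hBx]
      have hcnt1 : (((nums.take i) ++ [x]).count x : Int) = ((nums.take i).count x : Int) + 1 :=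
        count_take_mem _ x
      have hCinv : InvC ((nums.take i) ++ [x]) C := htake ▸ hC
      by_cases hmem : x ∈ nums.take i
      · have hne : ¬ ((((nums.take i) ++ [x]).count x : Int) - 1 = 0) := by
          have := List.count_pos_iff.2 hmem
          omega
        rw [if_pos hne]
        exact ih (le_of_lt hilen) _ _ hB1 (InvC_step_pos (nums.take i) x C hCinv hmem)
      · have heq : ((((nums.take i) ++ [x]).count x : Int) - 1 = 0) := by
          have := List.count_eq_zero.2 hmem
          omega
        rw [if_neg (by omega)]
        exact ih (le_of_lt hilen) _ _ hB1 (InvC_step_zero (nums.take i) x C hCinv hmem)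

theorem mF_pos_of_ne_nil (p : List Int) (hp : p ≠ []) : 1 ≤ mF p :=
  one_le_of_cC_ne_zero p (mF p) (cC_mF_ne_zero p hp)

theorem alt_go (l : List Int) : ∀ (p : List Int) (count freq : PySem.Dict Int Int) (maxF res : Int),
    (∀ y, count.getD y 0 = (p.count y : Int)) →
    (∀ f, 1 ≤ f → freq.getD f 0 = cC p f) →
    maxF = mF p →
    res = aSpec (p ++ l) p.length →
    ((PySem.List.enumerate l (p.length : Int)).foldl altStep (count, freq, maxF, res)).2.2.2
      = aSpec (p ++ l) (p ++ l).length := by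
  induction l with
  | nil =>
    intro p count freq maxF res _ _ _ hres
    simpa using hres
  | cons x t ih =>
    intro p count freq maxF res hcount hfreq hmax hres
    rw [PySem.List.enumerate_cons, List.foldl_cons]
    simp only [altStep]
    set c : Int := count.getD x 0 + 1 with hcdef
    set freq1 : PySem.Dict Int Int :=
      (if 1 < c then freq.insert (c - 1) (freq.getD (c - 1) 0 - 1) else freq) with hfreq1
    set freq2 : PySem.Dict Int Int := freq1.insert c (freq1.getD c 0 + 1) with hfreq2
    set maxF2 : Int := (if maxF < c then c else maxF) with hmax2
    set p' : List Int := p ++ [x] with hp'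
    have hp'ne : p' ≠ [] := by simp [hp']
    have hplen : p'.length = p.length + 1 := by simp [hp']
    have hlen' : (p'.length : Int) = (p.length : Int) + 1 := by
      rw [hplen]
      push_cast
      ring
    have hq : p ++ x :: t = p' ++ t := by simp [hp']
    have hcc2 : c = (p.count x : Int) + 1 := by rw [hcdef, hcount x]
    have hc : c = (p'.count x : Int) := by
      rw [hcc2, hp', count_take_mem]
    have hcount' : ∀ y, (count.insert x c).getD y 0 = (p'.count y : Int) := by
      intro y
      rw [PySem.Dict.getD_insert]
      by_cases h2 : y = x
      · rw [if_pos h2, h2, hc]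
      · rw [if_neg h2, hcount y, hp', count_append_singleton, if_neg h2]
        push_cast
        ring
    have hxmem : 1 < c ↔ x ∈ p := by
      have h1 : x ∈ p ↔ 0 < p.count x := (List.count_pos_iff).symm
      rw [hcc2, h1]
      omega
    have hc1 : 1 ≤ c := by
      rw [hcc2]
      omega
    have hfreq1v : ∀ f, 1 ≤ f →
        freq1.getD f 0 = cC p f - (if f = c - 1 ∧ x ∈ p then 1 else 0) := by
      intro f hf
      rw [hfreq1]
      by_cases hm : 1 < c
      · rw [if_pos hm, PySem.Dict.getD_insert]
        by_cases h2 : f = c - 1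
        · rw [if_pos h2, hfreq (c-1) (by omega), if_pos ⟨h2, hxmem.1 hm⟩, h2]
        · rw [if_neg h2, hfreq f hf, if_neg (fun hh => h2 hh.1)]
          omega
      · rw [if_neg hm]
        have hxp : x ∉ p := fun hh => hm (hxmem.2 hh)
        rw [hfreq f hf, if_neg (fun hh => hxp hh.2)]
        omega
    have hfreq2v : ∀ f, 1 ≤ f → freq2.getD f 0 = cC p' f := by
      intro f hf
      have hcap := cC_append p x f
      rw [← hp'] at hcap
      have hcc : (p.count x : Int) = c - 1 := by omega
      rw [hcc] at hcap
      rw [hfreq2, PySem.Dict.getD_insert]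
      by_cases h2 : f = c
      · subst h2
        rw [if_pos rfl, hfreq1v c hc1, hcap]
        rw [if_pos (show c = c - 1 + 1 by omega),
          if_neg (show ¬ (c = c - 1 ∧ x ∈ p) from fun hh => by omega)]
        omega
      · rw [if_neg h2, hfreq1v f hf, hcap]
        rw [if_neg (show ¬ f = c - 1 + 1 by omega)]
        omega
    have hmax' : maxF2 = mF p' := by
      rw [hmax2, hp', mF_append, hmax, ← hcc2]
      by_cases hlt : mF p < c
      · rw [if_pos hlt, max_eq_right hlt.le]
      · rw [if_neg hlt, max_eq_left (not_lt.1 hlt)]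
    rw [hmax']
    have hM1le : 1 ≤ mF p' := mF_pos_of_ne_nil p' hp'ne
    have hcondeq :
        ((mF p' == 1
          || (freq2.getD (mF p') 0 == 1 && mF p' == (p.length : Int) + 1)
          || (freq2.getD 1 0 == 1 && mF p' * freq2.getD (mF p') 0 == (p.length : Int) + 1 - 1)
          || (freq2.getD (mF p') 0 == 1
              && (mF p' - 1) * (freq2.getD (mF p' - 1) 0 + 1) == (p.length : Int) + 1 - 1)) : Bool)
        = good p' := by
      by_cases hM1 : mF p' = 1
      · simp [good, hM1]
      · rw [hfreq2v (mF p') (by omega), hfreq2v 1 (le_refl 1), hfreq2v (mF p' - 1) (by omega),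
          ← hlen']
        simp only [good]
    rw [hcondeq, hq, ← hlen']
    have hresfinal : (if good p' = true then ((p'.length : Int)) else res)
        = aSpec (p' ++ t) p'.length := by
      rw [hplen, aSpec, List.take_left' hplen]
      by_cases hg : good p' = true
      · rw [if_pos hg, if_pos hg]
        push_cast
        ring
      · rw [if_neg hg, if_neg hg, hres, hq]
    rw [hresfinal]
    exact ih p' (count.insert x c) freq2 (mF p') (aSpec (p' ++ t) p'.length)
      hcount' hfreq2v rfl rfl

theorem cC_nil (f : Int) : cC [] f = 0 := rfl

theorem values_counter (nums : List Int) :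
    (PySem.Dict.counter nums).values
      = (PySem.Set.ofList nums).map (fun k => (nums.count k : Int)) := by
  simp [PySem.Dict.values, PySem.Dict.items_counter, List.map_map, Function.comp_def]

theorem InvC_init (nums : List Int) :
    InvC nums (PySem.Dict.counter (PySem.Dict.counter nums).values) := by
  have hvals := values_counter nums
  have hcnt : ∀ f, ((PySem.Dict.counter nums).values.count f : Int) = cC nums f := by
    intro f
    rw [hvals]
    unfold cC
    congr 1
    simp [List.count, List.countP_map, Function.comp_def]
  refine ⟨PySem.Dict.nodup_keys_counter _, ?_, ?_⟩
  · intro f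
    rw [PySem.Dict.getD_counter, hcnt]
  · intro f
    rw [PySem.Dict.keys_counter, PySem.Set.mem_ofList]
    constructor
    · intro hf
      have : 0 < (PySem.Dict.counter nums).values.count f := List.count_pos_iff.2 hf
      have h2 := hcnt f
      omega
    · intro hf
      have h2 := hcnt f
      have : 0 < (PySem.Dict.counter nums).values.count f := by omega
      exact List.count_pos_iff.1 this

theorem main_eq (nums : List Int) :
    longest_equal_freq_prefix nums = longest_equal_freq_prefix_alt nums := by
  have hA : longest_equal_freq_prefix nums = aSpec nums nums.length := by
    unfold longest_equal_freq_prefix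
    apply pyLoopA_spec nums nums.length le_rfl
    · intro y
      rw [List.take_length]
      exact PySem.Dict.getD_counter nums y
    · rw [List.take_length]
      exact InvC_init nums
  have hB : longest_equal_freq_prefix_alt nums = aSpec nums nums.length := by
    unfold longest_equal_freq_prefix_alt
    have h := alt_go nums [] PySem.Dict.empty PySem.Dict.empty 0 0
      (fun y => by simp [PySem.Dict.getD_empty])
      (fun f _ => by rw [PySem.Dict.getD_empty, cC_nil])
      rfl rfl
    simpa using h
  rw [hA, hB]

-- ===== VERDICT (by name: the statement is the Claim_ definition above) =====
theorem longest_equal_freq_prefix_spec : Claim_equal_longest_equal_freq_prefix := by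
  intro nums _
  unfold Spec_longest_equal_freq_prefix
  exact main_eq nums
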